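-- pv_equiv track=rewrite | github.com/monkeyxite/mutt-mimelook | muttlook.py | escape_quotes
-- ===== SOURCE A (Python) =====
-- QUOTE_ESCAPE = "MIMELOOK_QUOTES"
--
-- def escape_quotes(plaintext):
--     """Convert "> "-style quotes into something else that passes untouched through html.escape().
--
--     Escaped quotes look like this: [[MIMELOOK_QUOTES|X]] where X denotes the
--     number of quotes that have been escaped.
--     """
--     ret = ""
--     for line in plaintext.split("\n"):
--         if line.startswith(">"):
--             i = 0
--             while i < len(line) and line[i] == ">":
--                 i += 1
--             ret += f"[[{QUOTE_ESCAPE}|{i}]]"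
--             ret += line[i:] + "\n"
--         else:
--             ret += line + "\n"
--
--     return ret
-- ===== SOURCE B (Python) =====
-- QUOTE_ESCAPE = "MIMELOOK_QUOTES"
--
-- def escape_quotes(plaintext):
--     # Single pass over the characters with a line-start state machine,
--     # instead of splitting into lines and re-scanning each line.
--     parts = []
--     count = 0
--     bol = True  # still inside the run of leading '>' of the current line
--     for ch in plaintext:
--         if bol and ch == ">":
--             count += 1
--         else:
--             if count:
--                 parts.append(f"[[{QUOTE_ESCAPE}|{count}]]")
--                 count = 0
--             parts.append(ch)
--             bol = ch == "\n"
--     if count: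
--         parts.append(f"[[{QUOTE_ESCAPE}|{count}]]")
--     parts.append("\n")
--     return "".join(parts)
-- ===== Notes on version B (the rewrite author's own statement) =====
-- stated objective: alternative
-- what changed: Replaces A's split-into-lines loop with an inner while-counter by a single character-level state-machine pass that tracks being at a line start and a pending count of leading '>' characters.
import Mathlib
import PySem

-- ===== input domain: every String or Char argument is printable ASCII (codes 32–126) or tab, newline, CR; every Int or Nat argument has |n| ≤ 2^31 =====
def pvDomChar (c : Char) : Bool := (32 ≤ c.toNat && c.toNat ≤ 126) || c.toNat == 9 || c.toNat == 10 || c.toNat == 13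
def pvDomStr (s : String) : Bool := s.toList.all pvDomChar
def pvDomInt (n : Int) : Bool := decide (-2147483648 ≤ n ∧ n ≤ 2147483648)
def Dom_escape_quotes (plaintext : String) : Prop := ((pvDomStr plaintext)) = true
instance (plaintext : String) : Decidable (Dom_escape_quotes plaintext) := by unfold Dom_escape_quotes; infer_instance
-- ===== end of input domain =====

-- B replaces A's per-line loop (with its inner '>'-counting while) by a single
-- character-level state-machine pass; same output, same asymptotic cost (alternative).

-- the module constant QUOTE_ESCAPE and the f-string "[[{QUOTE_ESCAPE}|{i}]]" (shared by both sources)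
def pyFstr (i : Nat) : List Char :=
  "[[MIMELOOK_QUOTES|".toList ++ PySem.Int.toChars (Int.ofNat i) ++ "]]".toList

-- ===== PORT A =====
-- the inner 'while i < len(line) and line[i] == ">": i += 1' (count of leading '>')
def aCount : List Char → Nat
  | [] => 0
  | c :: t => if c = '>' then aCount t + 1 else 0

-- one iteration of A's 'for line in plaintext.split("\n")' body: what it appends to ret
def aLine (line : List Char) : List Char :=
  if PySem.Chars.startswith line ['>'] then
    let i := aCount line
    pyFstr i ++ (PySem.Chars.slice line (some (i : Int)) none ++ ['\n'])
  else line ++ ['\n']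

def escape_quotes (plaintext : String) : String :=
  String.ofList
    ((PySem.Chars.splitOn plaintext.toList ['\n']).foldl (fun ret line => ret ++ aLine line) [])

-- ===== PORT B =====
-- one iteration of B's 'for ch in plaintext' body
def bStep (st : List (List Char) × Nat × Bool) (ch : Char) : List (List Char) × Nat × Bool :=
  match st with
  | (parts, count, bol) =>
    if bol && ch == '>' then (parts, count + 1, bol)
    else
      let parts := if count ≠ 0 then parts ++ [pyFstr count] else parts
      (parts ++ [[ch]], 0, ch == '\n')

def escape_quotes_alt (plaintext : String) : String :=
  match plaintext.toList.foldl bStep ([], 0, true) with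
  | (parts, count, _) =>
    let parts := if count ≠ 0 then parts ++ [pyFstr count] else parts
    String.ofList (PySem.Chars.join [] (parts ++ [['\n']]))

-- ===== PRECONDITION & SPEC =====
def Spec_escape_quotes (plaintext : String) (out : String) : Prop := out = escape_quotes_alt plaintext
instance (plaintext : String) (out : String) : Decidable (Spec_escape_quotes plaintext out) := by unfold Spec_escape_quotes; infer_instance

-- ===== CLAIM (what is proved, stated in full; the proofs are below) =====
def Claim_equal_escape_quotes : Prop := ∀ (plaintext : String), Dom_escape_quotes plaintext → Spec_escape_quotes plaintext (escape_quotes plaintext)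

-- ===== LEMMAS AND PROOFS =====

-- reference line splitter: what splitting on a single '\n' produces
def linesOf : List Char → List (List Char)
  | [] => [[]]
  | c :: t => if c = '\n' then [] :: linesOf t else List.modifyHead (c :: ·) (linesOf t)

theorem linesOf_ne_nil (l : List Char) : linesOf l ≠ [] := by
  cases l with
  | nil => simp [linesOf]
  | cons c t =>
    simp only [linesOf]
    split_ifs
    · simp
    · cases h : linesOf t with
      | nil => exact absurd h (linesOf_ne_nil t)
      | cons a b => simp [List.modifyHead]

theorem splitOn_go_eq :
    ∀ fuel (l cur : List Char) (acc : List (List Char)), l.length ≤ fuel →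
      PySem.Chars.splitOn.go ['\n'] fuel l cur acc
        = acc.reverse ++ List.modifyHead (cur.reverse ++ ·) (linesOf l) := by
  intro fuel
  induction fuel with
  | zero =>
    intro l cur acc h
    have : l = [] := List.eq_nil_of_length_eq_zero (Nat.le_zero.mp h)
    subst this
    simp [PySem.Chars.splitOn.go, linesOf]
  | succ f ih =>
    intro l cur acc h
    cases l with
    | nil => simp [PySem.Chars.splitOn.go, linesOf]
    | cons c t =>
      by_cases hc : c = '\n'
      · subst hc
        rw [show PySem.Chars.splitOn.go ['\n'] (f+1) ('\n' :: t) cur acc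
              = PySem.Chars.splitOn.go ['\n'] f t [] (cur.reverse :: acc) by
            simp [PySem.Chars.splitOn.go, List.isPrefixOf]]
        rw [ih t [] (cur.reverse :: acc) (by simpa using Nat.le_of_succ_le_succ h)]
        cases h' : linesOf t with
        | nil => exact absurd h' (linesOf_ne_nil t)
        | cons a b => simp [linesOf, h']
      · rw [show PySem.Chars.splitOn.go ['\n'] (f+1) (c :: t) cur acc
              = PySem.Chars.splitOn.go ['\n'] f t (c :: cur) acc by
            simp only [PySem.Chars.splitOn.go, List.isPrefixOf]
            rw [if_neg]
            simp only [Bool.and_eq_true, beq_iff_eq]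
            exact fun hp => hc hp.1.symm]
        rw [ih t (c :: cur) acc (by simpa using Nat.le_of_succ_le_succ h)]
        cases h' : linesOf t with
        | nil => exact absurd h' (linesOf_ne_nil t)
        | cons a b => simp [linesOf, hc, h']

theorem splitOn_eq_linesOf (l : List Char) :
    PySem.Chars.splitOn l ['\n'] = linesOf l := by
  rw [PySem.Chars.splitOn, splitOn_go_eq (l.length + 1) l [] [] (by omega)]
  cases h : linesOf l with
  | nil => exact absurd h (linesOf_ne_nil l)
  | cons a b => simp

-- the result of A, on the list side
def aBody (l : List Char) : List Char := (linesOf l).flatMap aLine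

theorem escape_quotes_eq_aBody (p : String) :
    escape_quotes p = String.ofList (aBody p.toList) := by
  rw [escape_quotes, splitOn_eq_linesOf, PySem.List.foldl_append_eq_flatMap, aBody,
    List.nil_append]

-- join with empty separator is flatten
theorem join_nil_sep (l : List (List Char)) : PySem.Chars.join [] l = l.flatten := by
  induction l with
  | nil => simp [PySem.Chars.join, List.intercalate]
  | cons a t ih =>
    cases t with
    | nil => simp [PySem.Chars.join, List.intercalate]
    | cons b u =>
      rw [PySem.Chars.join] at *
      simp only [List.intercalate, List.intersperse] at *
      simp_all

-- what B finally returns from a machine state (flush the pending count, add "\n", join)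
def bFinish (st : List (List Char) × Nat × Bool) : List Char :=
  match st with
  | (parts, count, _) => ((if count ≠ 0 then parts ++ [pyFstr count] else parts) ++ [['\n']]).flatten

theorem escape_quotes_alt_eq (p : String) :
    escape_quotes_alt p = String.ofList (bFinish (p.toList.foldl bStep ([], 0, true))) := by
  rw [escape_quotes_alt]
  cases h : p.toList.foldl bStep ([], 0, true) with
  | mk parts rest =>
    cases rest with
    | mk count b => simp [bFinish, join_nil_sep]

theorem aCount_replicate (k : Nat) : aCount (List.replicate k '>') = k := by
  induction k with
  | zero => simp [aCount]
  | succ n ih => simp [List.replicate_succ, aCount, ih]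

theorem aCount_replicate_cons (k : Nat) (c : Char) (h : c ≠ '>') (t : List Char) :
    aCount (List.replicate k '>' ++ c :: t) = k := by
  induction k with
  | zero => simp [aCount, h]
  | succ n ih => simp [List.replicate_succ, aCount, ih]

theorem aLine_replicate (k : Nat) :
    aLine (List.replicate k '>') = (if k ≠ 0 then pyFstr k else []) ++ ['\n'] := by
  cases k with
  | zero => simp [aLine, PySem.Chars.startswith]
  | succ n =>
    rw [aLine]
    rw [if_pos (by simp [PySem.Chars.startswith, List.replicate_succ, List.isPrefixOf])]
    simp only [aCount_replicate, PySem.Chars.slice_eq_listSlice, PySem.List.slice_from_natCast]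
    simp

theorem aLine_replicate_cons (k : Nat) (c : Char) (h : c ≠ '>') (t : List Char) :
    aLine (List.replicate k '>' ++ c :: t)
      = (if k ≠ 0 then pyFstr k else []) ++ (c :: t ++ ['\n']) := by
  cases k with
  | zero =>
    simp only [List.replicate, List.nil_append]
    rw [aLine, if_neg (by simp [PySem.Chars.startswith, List.isPrefixOf, Ne.symm h])]
    simp
  | succ n =>
    rw [aLine]
    rw [if_pos (by simp [PySem.Chars.startswith, List.replicate_succ, List.isPrefixOf])]
    simp only [aCount_replicate_cons _ _ h, PySem.Chars.slice_eq_listSlice,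
      PySem.List.slice_from_natCast]
    simp

theorem linesOf_replicate_append (k : Nat) (l : List Char) :
    linesOf (List.replicate k '>' ++ l) = List.modifyHead (List.replicate k '>' ++ ·) (linesOf l) := by
  induction k with
  | zero =>
    cases h : linesOf l with
    | nil => exact absurd h (linesOf_ne_nil l)
    | cons a b => simp [h]
  | succ n ih =>
    rw [List.replicate_succ, List.cons_append, linesOf, if_neg (by decide), ih]
    cases h : linesOf l with
    | nil => exact absurd h (linesOf_ne_nil l)
    | cons a b => simp

theorem aBody_replicate (k : Nat) :
    aBody (List.replicate k '>') = (if k ≠ 0 then pyFstr k else []) ++ ['\n'] := by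
  rw [aBody, ← List.append_nil (List.replicate k '>'), linesOf_replicate_append]
  simp [linesOf, aLine_replicate]

theorem aBody_replicate_nl (k : Nat) (t : List Char) :
    aBody (List.replicate k '>' ++ '\n' :: t)
      = (if k ≠ 0 then pyFstr k else []) ++ '\n' :: aBody t := by
  rw [aBody, linesOf_replicate_append, linesOf, if_pos rfl]
  simp [aLine_replicate, aBody]

theorem aBody_replicate_mid (k : Nat) (c : Char) (t : List Char)
    (hc : c ≠ '>') (hn : c ≠ '\n') :
    aBody (List.replicate k '>' ++ c :: t)
      = (if k ≠ 0 then pyFstr k else [])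
          ++ c :: ((linesOf t).headI ++ '\n' :: (linesOf t).tail.flatMap aLine) := by
  rw [aBody, linesOf_replicate_append, linesOf, if_neg hn]
  cases h' : linesOf t with
  | nil => exact absurd h' (linesOf_ne_nil t)
  | cons a b =>
    simp only [List.modifyHead, List.flatMap_cons, aLine_replicate_cons k c hc]
    simp

-- the joint loop invariant for B's fold: in a line-start state with k pending quotes,
-- the machine produces A's output for (replicate k '>' ++ l); in a mid-line state it
-- copies the rest of the current line and then behaves like A.
theorem bFold_invariant (l : List Char) :
    (∀ (parts : List (List Char)) (k : Nat),
       bFinish (l.foldl bStep (parts, k, true))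
         = parts.flatten ++ aBody (List.replicate k '>' ++ l)) ∧
    (∀ (parts : List (List Char)),
       bFinish (l.foldl bStep (parts, 0, false))
         = parts.flatten ++ ((linesOf l).headI ++ '\n' :: (linesOf l).tail.flatMap aLine)) := by
  induction l with
  | nil =>
    constructor
    · intro parts k
      rw [List.foldl_nil, List.append_nil, aBody_replicate, bFinish]
      split_ifs <;> simp
    · intro parts
      simp [bFinish, linesOf]
  | cons c t ih =>
    constructor
    · intro parts k
      by_cases hc : c = '>'
      · subst hc
        rw [List.foldl_cons, show bStep (parts, k, true) '>' = (parts, k + 1, true) by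
          simp [bStep]]
        rw [ih.1 parts (k + 1)]
        rw [show List.replicate k '>' ++ '>' :: t = List.replicate (k+1) '>' ++ t by
          rw [List.replicate_succ']; simp]
      · rw [List.foldl_cons, show bStep (parts, k, true) c
              = ((if k ≠ 0 then parts ++ [pyFstr k] else parts) ++ [[c]], 0, c == '\n') by
            simp [bStep, hc]]
        by_cases hn : c = '\n'
        · subst hn
          rw [show (('\n' : Char) == '\n') = true by decide]
          rw [ih.1 _ 0, aBody_replicate_nl k t]
          split_ifs <;> simp [aBody]
        · rw [show ((c : Char) == '\n') = false by simp [hn]]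
          rw [ih.2, aBody_replicate_mid k c t hc hn]
          split_ifs <;> simp
    · intro parts
      rw [List.foldl_cons, show bStep (parts, 0, false) c = (parts ++ [[c]], 0, c == '\n') by
        simp [bStep]]
      by_cases hn : c = '\n'
      · subst hn
        rw [show (('\n' : Char) == '\n') = true by decide]
        rw [ih.1 _ 0]
        simp [linesOf, aBody]
      · rw [show ((c : Char) == '\n') = false by simp [hn]]
        rw [ih.2]
        simp only [linesOf, if_neg hn]
        cases h' : linesOf t with
        | nil => exact absurd h' (linesOf_ne_nil t)
        | cons a b => simp

theorem alt_eq_aBody (p : String) :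
    escape_quotes_alt p = String.ofList (aBody p.toList) := by
  rw [escape_quotes_alt_eq, (bFold_invariant p.toList).1 [] 0]
  simp

-- ===== VERDICT (by name: the statement is the Claim_ definition above) =====
theorem escape_quotes_spec : Claim_equal_escape_quotes := by
  intro p _
  unfold Spec_escape_quotes
  rw [escape_quotes_eq_aBody, alt_eq_aBody]
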